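-- pv_equiv track=rewrite | github.com/susannah-go/CSCI8920 | problem set 7/hex2Base64.py | map_to_base64
-- ===== SOURCE A (Python) =====
-- import math
--
-- base64Dict = {0: 'A', 1: 'B', 2: 'C', 3: 'D', 4: 'E', 5: 'F', 6: 'G', 7: 'H', 8: 'I', 9: 'J', 10: 'K', 11: 'L',
--               12: 'M', 13: 'N', 14: 'O', 15: 'P', 16: 'Q', 17: 'R', 18: 'S', 19: 'T', 20: 'U', 21: 'V', 22: 'W',
--               23: 'X', 24: 'Y', 25: 'Z', 26: 'a', 27: 'b', 28: 'c', 29: 'd', 30: 'e', 31: 'f', 32: 'g', 33: 'h',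
--               34: 'i', 35: 'j', 36: 'k', 37: 'l', 38: 'm', 39: 'n', 40: 'o', 41: 'p', 42: 'q', 43: 'r', 44: 's',
--               45: 't', 46: 'u', 47: 'v', 48: 'w', 49: 'x', 50: 'y', 51: 'z', 52: '0', 53: '1', 54: '2', 55: '3',
--               56: '4', 57: '5', 58: '6', 59: '7', 60: '8', 61: '9', 62: '+', 63: '/'}
--
-- def bin2dec(s):
--     dec_num = 0
--     exp = len(s) - 1
--     for d in s:
--         if d == '1':
--             dec_num += int(math.pow(2, exp))
--         exp -= 1
--     return dec_num
--
-- def map_to_base64(n):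
--     s = str(n)
--     b64_string = ""
--     start = 0
--     end = 6
--     while end <= len(s):
--         bi_index = s[start:end]
--         dec_num = bin2dec(bi_index)
--         b64_string += base64Dict[dec_num]
--         start += 6
--         end += 6
--     return b64_string
-- ===== SOURCE B (Python) =====
-- B64_ALPHABET = "ABCDEFGHIJKLMNOPQRSTUVWXYZabcdefghijklmnopqrstuvwxyz0123456789+/"
--
-- def map_to_base64(n):
--     out = []
--     val = 0
--     count = 0
--     for c in str(n):
--         val = val * 2 + (1 if c == '1' else 0)
--         count += 1
--         if count == 6:
--             out.append(B64_ALPHABET[val])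
--             val = 0
--             count = 0
--     return "".join(out)
-- ===== Notes on version B (the rewrite author's own statement) =====
-- stated objective: simpler
-- what changed: Replaces the chunk-slicing while loop plus the math.pow bit-weighting inner loop (and the 64-entry dict) with one streaming pass over the characters keeping a running bit accumulator and a counter, indexing a base64 alphabet string; a trailing partial group is dropped because the counter never completes it.
import Mathlib
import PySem

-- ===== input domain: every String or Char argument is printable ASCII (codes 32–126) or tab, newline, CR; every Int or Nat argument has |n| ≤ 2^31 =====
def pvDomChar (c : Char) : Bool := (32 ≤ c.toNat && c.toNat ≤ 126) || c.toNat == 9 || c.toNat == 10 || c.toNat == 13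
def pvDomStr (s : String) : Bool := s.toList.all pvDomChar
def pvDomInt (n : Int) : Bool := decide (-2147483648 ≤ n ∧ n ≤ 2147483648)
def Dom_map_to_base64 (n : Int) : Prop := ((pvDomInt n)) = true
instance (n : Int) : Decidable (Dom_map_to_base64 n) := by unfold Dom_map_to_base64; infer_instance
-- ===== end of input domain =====

-- B replaces A's chunk-slicing while loop + math.pow inner loop + 64-entry dict by one
-- streaming pass with a running 6-bit accumulator and an alphabet-string index (objective: simpler).

-- ===== PORT A =====
-- the module constant base64Dict, a dict literal
def base64Dict : PySem.Dict Int String := PySem.Dict.ofList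
  [(0, "A"), (1, "B"), (2, "C"), (3, "D"), (4, "E"), (5, "F"), (6, "G"), (7, "H"), (8, "I"), (9, "J"), (10,
  "K"), (11, "L"), (12, "M"), (13, "N"), (14, "O"), (15, "P"), (16, "Q"), (17, "R"), (18, "S"), (19, "T"), (20,
  "U"), (21, "V"), (22, "W"), (23, "X"), (24, "Y"), (25, "Z"), (26, "a"), (27, "b"), (28, "c"), (29, "d"), (30,
  "e"), (31, "f"), (32, "g"), (33, "h"), (34, "i"), (35, "j"), (36, "k"), (37, "l"), (38, "m"), (39, "n"), (40,
  "o"), (41, "p"), (42, "q"), (43, "r"), (44, "s"), (45, "t"), (46, "u"), (47, "v"), (48, "w"), (49, "x"), (50,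
  "y"), (51, "z"), (52, "0"), (53, "1"), (54, "2"), (55, "3"), (56, "4"), (57, "5"), (58, "6"), (59, "7"), (60,
  "8"), (61, "9"), (62, "+"), (63, "/")]

-- bin2dec: for d in s: if d == '1': dec_num += int(math.pow(2, exp)); exp -= 1
-- int(math.pow(2, exp)) is ported as 2 ^ exp (exact: here exp is always 0..5, where math.pow is exact)
def bin2dec (s : List Char) : Int :=
  (s.foldl (fun (st : Int × Int) d =>
      (if d = '1' then st.1 + 2 ^ st.2.toNat else st.1, st.2 - 1))
    (0, (s.length : Int) - 1)).1

-- the while loop of map_to_base64; state (b64_string, start, end).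
-- base64Dict[dec_num] is get? …; the .getD "" arm is the KeyError, unreachable since bin2dec of a
-- 6-char slice is in 0..63.
def mapLoop (s : List Char) (acc : List Char) (start e : Int) : List Char :=
  if _h : e ≤ (s.length : Int) then
    mapLoop s
      (acc ++ ((base64Dict.get? (bin2dec (PySem.List.slice s (some start) (some e)))).getD "").toList)
      (start + 6) (e + 6)
  else acc
termination_by ((s.length : Int) + 1 - e).toNat
decreasing_by omega

def map_to_base64 (n : Int) : String :=
  String.ofList (mapLoop (PySem.Int.toChars n) [] 0 6)

-- ===== PORT B =====
def b64Alpha : List Char :=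
  ['A', 'B', 'C', 'D', 'E', 'F', 'G', 'H', 'I', 'J', 'K', 'L', 'M', 'N', 'O', 'P', 'Q', 'R', 'S', 'T', 'U', 'V',
  'W', 'X', 'Y', 'Z', 'a', 'b', 'c', 'd', 'e', 'f', 'g', 'h', 'i', 'j', 'k', 'l', 'm', 'n', 'o', 'p', 'q', 'r',
  's', 't', 'u', 'v', 'w', 'x', 'y', 'z', '0', '1', '2', '3', '4', '5', '6', '7', '8', '9', '+', '/']

-- one step of B's streaming loop; state (val, count, out).
-- B64_ALPHABET[val] is pyGet? …; the .getD ' ' arm is the IndexError, unreachable since val < 64.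
def b64Step (st : Int × Int × List Char) (c : Char) : Int × Int × List Char :=
  let val := st.1 * 2 + (if c = '1' then 1 else 0)
  let cnt := st.2.1 + 1
  if cnt = 6 then (0, 0, st.2.2 ++ [(PySem.List.pyGet? b64Alpha val).getD ' '])
  else (val, cnt, st.2.2)

def map_to_base64_alt (n : Int) : String :=
  String.ofList (((PySem.Int.toChars n).foldl b64Step (0, 0, ([] : List Char))).2.2)

-- ===== PRECONDITION & SPEC =====
def Spec_map_to_base64 (n : Int) (out : String) : Prop := out = map_to_base64_alt n
instance (n : Int) (out : String) : Decidable (Spec_map_to_base64 n out) := by unfold Spec_map_to_base64; infer_instance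

-- ===== CLAIM (what is proved, stated in full; the proofs are below) =====
def Claim_equal_map_to_base64 : Prop := ∀ (n : Int), Dom_map_to_base64 n → Spec_map_to_base64 n (map_to_base64 n)

-- ===== LEMMAS AND PROOFS =====

-- fewer than 6 - c characters left: B's loop never fires the emit branch, out is unchanged
theorem foldl_b64Step_short (t : List Char) (v c : Int) (acc : List Char)
    (h : c + (t.length : Int) < 6) :
    (t.foldl b64Step (v, c, acc)).2.2 = acc := by
  induction t generalizing v c with
  | nil => rfl
  | cons x xs ih =>
      simp only [List.foldl_cons, b64Step]
      have hne : ¬ (c + 1 = 6) := by simp at h; omega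
      simp only [hne, if_false]
      apply ih
      simp at h ⊢; omega

-- the two lookups agree on 0..63
set_option maxRecDepth 8192 in
theorem lookup_eq (v : Int) (h0 : 0 ≤ v) (h1 : v < 64) :
    ((base64Dict.get? v).getD "").toList = [(PySem.List.pyGet? b64Alpha v).getD ' '] := by
  interval_cases v <;> decide

-- six characters available: B's loop emits exactly A's chunk character and resets
set_option maxRecDepth 8192 in
theorem foldl_b64Step_six (c1 c2 c3 c4 c5 c6 : Char) (rest acc : List Char) :
    ((c1 :: c2 :: c3 :: c4 :: c5 :: c6 :: rest).foldl b64Step (0, 0, acc)).2.2 =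
      (rest.foldl b64Step
        (0, 0, acc ++ ((base64Dict.get? (bin2dec [c1, c2, c3, c4, c5, c6])).getD "").toList)).2.2 := by
  by_cases h1 : c1 = '1' <;> by_cases h2 : c2 = '1' <;> by_cases h3 : c3 = '1' <;>
    by_cases h4 : c4 = '1' <;> by_cases h5 : c5 = '1' <;> by_cases h6 : c6 = '1' <;>
    simp [b64Step, bin2dec, h1, h2, h3, h4, h5, h6, lookup_eq]

-- the main loop correspondence: A's chunk loop from position k = B's streaming fold over the tail
theorem mapLoop_eq_fold (s : List Char) : ∀ (k : Nat) (acc : List Char),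
    mapLoop s acc (k : Int) ((k : Int) + 6) = ((s.drop k).foldl b64Step (0, 0, acc)).2.2 := by
  intro k
  induction hm : s.length - k using Nat.strong_induction_on generalizing k with
  | _ m ih =>
  intro acc
  rw [mapLoop]
  by_cases hle : ((k : Int) + 6) ≤ (s.length : Int)
  · simp only [hle, dif_pos]
    -- the slice is the 6-character chunk at position k
    have hslice : PySem.List.slice s (some (k : Int)) (some ((k : Int) + 6)) = (s.drop k).take 6 := by
      have := PySem.List.slice_natCast_add (xs := s) (j := k) (n := 6)
      simpa using this
    -- the tail has at least 6 characters: name them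
    have hlen : 6 ≤ (s.drop k).length := by simp; omega
    obtain ⟨c1, t1, h1⟩ := List.exists_cons_of_ne_nil (l := s.drop k) (by intro h; rw [h] at hlen; simp at hlen)
    rw [h1] at hlen
    obtain ⟨c2, t2, h2⟩ := List.exists_cons_of_ne_nil (l := t1) (by intro h; rw [h] at hlen; simp at hlen)
    rw [h2] at hlen
    obtain ⟨c3, t3, h3⟩ := List.exists_cons_of_ne_nil (l := t2) (by intro h; rw [h] at hlen; simp at hlen)
    rw [h3] at hlen
    obtain ⟨c4, t4, h4⟩ := List.exists_cons_of_ne_nil (l := t3) (by intro h; rw [h] at hlen; simp at hlen)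
    rw [h4] at hlen
    obtain ⟨c5, t5, h5⟩ := List.exists_cons_of_ne_nil (l := t4) (by intro h; rw [h] at hlen; simp at hlen)
    rw [h5] at hlen
    obtain ⟨c6, t6, h6⟩ := List.exists_cons_of_ne_nil (l := t5) (by intro h; rw [h] at hlen; simp at hlen)
    have hdk : s.drop k = c1 :: c2 :: c3 :: c4 :: c5 :: c6 :: t6 := by
      rw [h1, h2, h3, h4, h5, h6]
    have hrest : s.drop (k + 6) = t6 := by
      rw [← List.drop_drop, hdk]; rfl
    have htake : (s.drop k).take 6 = [c1, c2, c3, c4, c5, c6] := by rw [hdk]; rfl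
    have hcast : ((k : Int) + 6) = ((k + 6 : Nat) : Int) := by push_cast; ring
    rw [hslice, htake, hcast,
        ih (s.length - (k + 6)) (by omega) (k + 6) rfl, hrest, hdk, foldl_b64Step_six]
  · simp only [hle]
    refine (foldl_b64Step_short _ 0 0 acc ?_).symm
    simp only [List.length_drop]
    omega

-- ===== VERDICT (by name: the statement is the Claim_ definition above) =====
theorem map_to_base64_spec : Claim_equal_map_to_base64 := by
  intro n _
  unfold Spec_map_to_base64 map_to_base64 map_to_base64_alt
  have := mapLoop_eq_fold (PySem.Int.toChars n) 0 []
  simpa using congrArg String.ofList this
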